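-- pv_equiv track=rewrite | github.com/Pritz69/GFG_POTD | Array_Operations.py | arrayOperations
-- ===== SOURCE A (Python) =====
-- from typing import List
--
-- def arrayOperations(n : int, arr : List[int]) -> int:
--     # code here
--     if arr.count(0)==0 :
--         return -1
--     if arr.count(0)==n :
--         return 0
--     c=0
--     for i in range(1,len(arr)):
--         if arr[i-1]!=0 and arr[i]==0:
--             c+=1
--     if arr[-1]>0:
--         c+=1
--     return c
-- ===== SOURCE B (Python) =====
-- from typing import List
--
-- def arrayOperations(n : int, arr : List[int]) -> int:
--     if arr.count(0) == 0:
--         return -1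
--     if arr.count(0) == n:
--         return 0
--     # run-length encode arr into the alternating is-zero flags of its maximal runs
--     runs = []
--     for x in arr:
--         f = (x == 0)
--         if not runs or runs[-1] != f:
--             runs.append(f)
--     # every zero-run except a leading one is entered from a nonzero element
--     c = sum(1 for i, isz in enumerate(runs) if isz and i > 0)
--     if arr[-1] > 0:
--         c += 1
--     return c
-- ===== Notes on version B (the rewrite author's own statement) =====
-- stated objective: alternative
-- what changed: Replaces A's adjacent-pair index scan (arr[i-1]!=0 and arr[i]==0 over range(1,len)) by run-length encoding the array into its maximal is-zero run flags and counting the zero-runs after the first.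
import Mathlib
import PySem

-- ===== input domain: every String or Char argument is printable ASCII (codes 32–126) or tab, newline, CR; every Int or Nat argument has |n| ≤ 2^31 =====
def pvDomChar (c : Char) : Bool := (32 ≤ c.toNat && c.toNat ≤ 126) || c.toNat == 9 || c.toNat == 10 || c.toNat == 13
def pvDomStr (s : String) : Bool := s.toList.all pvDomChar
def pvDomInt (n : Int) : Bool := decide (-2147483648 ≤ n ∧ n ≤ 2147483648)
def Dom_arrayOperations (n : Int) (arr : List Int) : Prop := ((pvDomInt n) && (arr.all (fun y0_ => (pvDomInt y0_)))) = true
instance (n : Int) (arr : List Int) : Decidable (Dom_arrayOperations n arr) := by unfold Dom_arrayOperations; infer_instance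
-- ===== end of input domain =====

-- B replaces A's adjacent-pair index scan by run-length encoding into is-zero run flags
-- and counting the zero-runs after the first (objective: alternative).

-- ===== PORT A =====
-- `arr[i-1]` / `arr[i]` for i in range(1, len(arr)) are always in range, and the
-- `arr[-1]` branch is only reached when arr.count(0) ≠ 0 (so arr ≠ []); pyGetD is exact there.
def arrayOperations (n : Int) (arr : List Int) : Int :=
  if (PySem.List.count arr 0 : Int) = 0 then -1
  else if (PySem.List.count arr 0 : Int) = n then 0
  else
    let c : Int := (PySem.List.pyRange 1 (arr.length : Int) 1).foldl
      (fun c i => if PySem.List.pyGetD arr (i-1) 0 ≠ 0 ∧ PySem.List.pyGetD arr i 0 = 0 then c + 1 else c) 0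
    if PySem.List.pyGetD arr (-1) 0 > 0 then c + 1 else c

-- ===== PORT B =====
-- `arr[-1]` is only reached when arr.count(0) ≠ 0 (so arr ≠ []); pyGetD is exact there.
def arrayOperations_alt (n : Int) (arr : List Int) : Int :=
  if (PySem.List.count arr 0 : Int) = 0 then -1
  else if (PySem.List.count arr 0 : Int) = n then 0
  else
    let runs : List Bool := arr.foldl
      (fun runs x =>
        let f := decide (x = 0)
        if runs = [] ∨ runs.getLast? ≠ some f then runs ++ [f] else runs) []
    let c : Int := (PySem.List.enumerate runs 0).foldl
      (fun c p => if p.2 = true ∧ p.1 > 0 then c + 1 else c) 0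
    if PySem.List.pyGetD arr (-1) 0 > 0 then c + 1 else c

-- ===== PRECONDITION & SPEC =====
def Spec_arrayOperations (n : Int) (arr : List Int) (out : Int) : Prop := out = arrayOperations_alt n arr
instance (n : Int) (arr : List Int) (out : Int) : Decidable (Spec_arrayOperations n arr out) := by unfold Spec_arrayOperations; infer_instance

-- ===== CLAIM (what is proved, stated in full; the proofs are below) =====
def Claim_equal_arrayOperations : Prop := ∀ (n : Int) (arr : List Int), Dom_arrayOperations n arr → Spec_arrayOperations n arr (arrayOperations n arr)

-- ===== LEMMAS AND PROOFS =====

-- structural form of B's run-length flags, starting after a run with flag k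
def zrunsAux (k : Bool) : List Int → List Bool
  | [] => []
  | x :: xs => if decide (x = 0) = k then zrunsAux k xs
               else decide (x = 0) :: zrunsAux (decide (x = 0)) xs

-- B's accumulation loop computes zrunsAux from the last flag of the accumulator
theorem runsLoop_eq_zrunsAux (arr : List Int) :
    ∀ (rs : List Bool) (k : Bool), rs ≠ [] → rs.getLast? = some k →
    arr.foldl (fun runs x =>
        let f := decide (x = 0)
        if runs = [] ∨ runs.getLast? ≠ some f then runs ++ [f] else runs) rs
      = rs ++ zrunsAux k arr := by
  induction arr with
  | nil => intro rs k _ _; simp [zrunsAux]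
  | cons x xs ih =>
    intro rs k hne hlast
    by_cases hf : decide (x = 0) = k
    · simp only [List.foldl_cons, zrunsAux, hf, if_pos rfl]
      rw [if_neg (by simp [hne, hlast, hf])]
      exact ih rs k hne hlast
    · simp only [List.foldl_cons, zrunsAux, if_neg hf]
      rw [if_pos (by right; simp [hlast]; intro h; exact hf h.symm)]
      rw [ih (rs ++ [decide (x = 0)]) (decide (x = 0)) (by simp) (by simp)]
      simp

-- the enumerate sum with i > 0 counts the true flags after the first
theorem enumFold_eq_count (l : List Bool) :
    ∀ (s : Int) (init : Int), 1 ≤ s →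
    (PySem.List.enumerate l s).foldl (fun c p => if p.2 = true ∧ p.1 > 0 then c + 1 else c) init
      = init + (l.count true : Int) := by
  induction l with
  | nil => intro s init _; simp [PySem.List.enumerate_nil]
  | cons b l ih =>
    intro s init hs
    rw [PySem.List.enumerate_cons, List.foldl_cons, ih (s+1) _ (by omega)]
    cases b <;> simp [hs] <;> push_cast <;> omega

-- the pairs (arr[i-1], arr[i]) for i in range(1, len(arr)) are exactly zip arr arr.tail
theorem map_range_pairs (arr : List Int) :
    (PySem.List.pyRange 1 (arr.length : Int) 1).map
        (fun i => (PySem.List.pyGetD arr (i-1) 0, PySem.List.pyGetD arr i 0))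
      = arr.zip arr.tail := by
  apply List.ext_getElem
  · simp [PySem.List.length_pyRange_one, List.length_zip, List.length_tail]
  · intro k h1 h2
    have hk : k < arr.length - 1 := by
      simpa [List.length_zip, List.length_tail] using h2
    have hkl : k < arr.length := by omega
    have hkl1 : k + 1 < arr.length := by omega
    simp only [List.getElem_map, PySem.List.getElem_pyRange_one, List.getElem_zip]
    have e1 : (1 : Int) + k - 1 = (k : Int) := by ring
    have e2 : (1 : Int) + k = ((k + 1 : Nat) : Int) := by push_cast; ring
    rw [e1, e2, PySem.List.pyGetD_natCast, PySem.List.pyGetD_natCast]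
    simp [List.getD_eq_getElem?_getD, List.getElem?_eq_getElem, hkl, hkl1, List.getElem_tail]

-- A's adjacent-pair count equals the number of zero-runs after the first
theorem zip_fold_eq_zruns (xs : List Int) :
    ∀ (p : Int) (init : Int),
    (((p :: xs).zip xs).foldl
        (fun c pr => if pr.1 ≠ 0 ∧ pr.2 = 0 then c + 1 else c) init)
      = init + ((zrunsAux (decide (p = 0)) xs).count true : Int) := by
  induction xs with
  | nil => intro p init; simp [zrunsAux]
  | cons x xs ih =>
    intro p init
    rw [show (p :: x :: xs).zip (x :: xs) = (p, x) :: (x :: xs).zip xs from rfl]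
    rw [List.foldl_cons, ih x]
    by_cases hp : p = 0 <;> by_cases hx : x = 0 <;>
      simp [zrunsAux, hp, hx] <;> push_cast <;> omega

theorem arrayOperations_spec : Claim_equal_arrayOperations := by
  intro n arr _
  unfold Spec_arrayOperations arrayOperations arrayOperations_alt
  by_cases h0 : (PySem.List.count arr 0 : Int) = 0
  · rw [if_pos h0, if_pos h0]
  · rw [if_neg h0, if_neg h0]
    by_cases hn : (PySem.List.count arr 0 : Int) = n
    · rw [if_pos hn, if_pos hn]
    · rw [if_neg hn, if_neg hn]
      -- arr is nonempty since it contains a 0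
      have hne : arr ≠ [] := by
        intro he; subst he; simp [PySem.List.count] at h0
      obtain ⟨a, xs, rfl⟩ := List.exists_cons_of_ne_nil hne
      have hA : (PySem.List.pyRange 1 ((a :: xs).length : Int) 1).foldl
          (fun c i => if PySem.List.pyGetD (a :: xs) (i-1) 0 ≠ 0 ∧ PySem.List.pyGetD (a :: xs) i 0 = 0 then c + 1 else c) (0 : Int)
          = ((zrunsAux (decide (a = 0)) xs).count true : Int) := by
        have := map_range_pairs (a :: xs)
        calc (PySem.List.pyRange 1 ((a :: xs).length : Int) 1).foldl
              (fun c i => if PySem.List.pyGetD (a :: xs) (i-1) 0 ≠ 0 ∧ PySem.List.pyGetD (a :: xs) i 0 = 0 then c + 1 else c) (0 : Int)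
            = ((PySem.List.pyRange 1 ((a :: xs).length : Int) 1).map
                (fun i => (PySem.List.pyGetD (a :: xs) (i-1) 0, PySem.List.pyGetD (a :: xs) i 0))).foldl
                (fun c pr => if pr.1 ≠ 0 ∧ pr.2 = 0 then c + 1 else c) (0 : Int) := by
              rw [List.foldl_map]
          _ = ((a :: xs).zip (a :: xs).tail).foldl (fun c pr => if pr.1 ≠ 0 ∧ pr.2 = 0 then c + 1 else c) (0 : Int) := by
              rw [this]
          _ = ((zrunsAux (decide (a = 0)) xs).count true : Int) := by
              rw [List.tail_cons, zip_fold_eq_zruns xs a 0]; ring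
      have hB : ((a :: xs).foldl (fun runs x =>
            let f := decide (x = 0)
            if runs = [] ∨ runs.getLast? ≠ some f then runs ++ [f] else runs) ([] : List Bool))
          = decide (a = 0) :: zrunsAux (decide (a = 0)) xs := by
        rw [List.foldl_cons]
        have hstep : (let f := decide (a = 0);
            if ([] : List Bool) = [] ∨ ([] : List Bool).getLast? ≠ some f then [] ++ [f] else ([] : List Bool))
            = [decide (a = 0)] := by simp
        rw [hstep, runsLoop_eq_zrunsAux xs [decide (a = 0)] (decide (a = 0)) (by simp) (by simp)]
        simp
      have hBC : (PySem.List.enumerate (decide (a = 0) :: zrunsAux (decide (a = 0)) xs) 0).foldl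
            (fun c p => if p.2 = true ∧ p.1 > 0 then c + 1 else c) (0 : Int)
          = ((zrunsAux (decide (a = 0)) xs).count true : Int) := by
        rw [PySem.List.enumerate_cons, List.foldl_cons]
        have : (if (decide (a = 0)) = true ∧ (0:Int) > 0 then (0:Int) + 1 else 0) = 0 := by
          simp
        rw [this, enumFold_eq_count _ (0+1) 0 (by omega)]
        ring
      simp only [hA, hB, hBC]
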